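-- pv_equiv track=rewrite | github.com/PiiitrZ/Python_algTesting | my_CodilityEquiLeader.py | solution
-- ===== SOURCE A (Python) =====
-- def solution(A):
--     # write your code in Python 3.6
--
--     length = len(A)
--     res_count = 0
--
--     counter = 0
--
--     while counter < length:
--         counter += 1
--
--         leftSideLeader = find_leader(A[:counter])
--         if leftSideLeader != None:
--             rightSideLeader = find_leader(A[counter:])
--             if rightSideLeader != None:
--                 if leftSideLeader == rightSideLeader:
--                     res_count += 1
--
--     return res_count
--
-- def find_leader(B):
--     length = len(B)
--
--     if length == 1: return B[0]
--
--     b_sort = B[:]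
--     b_sort.sort()
--
--     max_count = 0
--
--
--     for idx, i in enumerate(b_sort):
--         if idx == 0:
--             count = 1
--         elif i == b_sort[idx - 1]:
--             count += 1
--         else:
--             count = 1
--
--         if count > max_count:
--             max_count = count
--             leader = i
--
--     if max_count > (length / 2):
--         return leader
-- ===== SOURCE B (Python) =====
-- def solution(A):
--     # Sort once: a strict-majority element of A must be the median of sorted(A);
--     # then one prefix-counting pass decides every split. O(n log n) vs A's O(n^2 log n).
--     n = len(A)
--     if n == 0:
--         return 0
--     cand = sorted(A)[n // 2]
--     total = A.count(cand)
--     if 2 * total <= n: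
--         return 0
--     res = 0
--     pref = 0
--     for i, v in enumerate(A, 1):
--         if v == cand:
--             pref += 1
--         if 2 * pref > i and 2 * (total - pref) > n - i:
--             res += 1
--     return res
-- ===== Notes on version B (the rewrite author's own statement) =====
-- stated objective: faster
-- what changed: Instead of recomputing a leader of every prefix and suffix by sorting each slice, B sorts once, takes the median as the unique possible majority candidate, and decides all splits in one prefix-counting pass.
import Mathlib
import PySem

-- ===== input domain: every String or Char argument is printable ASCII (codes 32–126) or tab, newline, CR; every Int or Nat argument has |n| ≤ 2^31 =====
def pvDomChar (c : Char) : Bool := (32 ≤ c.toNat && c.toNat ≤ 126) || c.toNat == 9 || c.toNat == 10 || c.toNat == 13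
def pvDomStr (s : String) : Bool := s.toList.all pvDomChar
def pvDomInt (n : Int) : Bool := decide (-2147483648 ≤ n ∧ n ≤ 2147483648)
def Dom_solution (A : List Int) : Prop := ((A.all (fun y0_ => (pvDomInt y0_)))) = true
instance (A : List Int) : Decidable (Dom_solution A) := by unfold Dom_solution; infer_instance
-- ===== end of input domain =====

-- B replaces A's per-split re-sorting (find_leader on every prefix and suffix) by one sort, the
-- median as sole majority candidate, and a single prefix-counting pass (objective: faster).

-- ===== PORT A =====
-- state = (prev element, current run count, max_count, leader); prev = none encodes idx == 0
def flStep (st : Option Int × Nat × Nat × Option Int) (i : Int) :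
    Option Int × Nat × Nat × Option Int :=
  let c : Nat := match st.1 with
    | none => 1
    | some p => if i = p then st.2.1 + 1 else 1
  if st.2.2.1 < c then (some i, c, c, some i) else (some i, c, st.2.2.1, st.2.2.2)

-- find_leader; 'max_count > length/2' on these ints is exactly 'length < 2*max_count'
def findLeader (B : List Int) : Option Int :=
  if B.length = 1 then PySem.List.pyGet? B 0
  else
    let s := PySem.List.sorted B (fun x => x) false
    let r := s.foldl flStep (none, 0, 0, none)
    if B.length < 2 * r.2.2.1 then r.2.2.2 else none

-- while loop over counter = 1..length; A[:counter]/A[counter:] with counter ≥ 0 are take/drop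
def solution (A : List Int) : Int :=
  (List.range A.length).foldl
    (fun res c =>
      match findLeader (A.take (c + 1)) with
      | none => res
      | some l =>
        match findLeader (A.drop (c + 1)) with
        | none => res
        | some r => if l = r then res + 1 else res)
    0

-- ===== PORT B =====
-- sorted(A)[n // 2]: index n//2 < n is always in range (n ≥ 1), so the total pyGetD is exact
def solution_alt (A : List Int) : Int :=
  let n : Int := A.length
  if n = 0 then 0
  else
    let cand : Int :=
      PySem.List.pyGetD (PySem.List.sorted A (fun x => x) false) (PySem.Int.floordiv n 2) 0
    let total : Int := A.count cand
    if 2 * total ≤ n then 0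
    else
      ((PySem.List.enumerate A 1).foldl
        (fun (st : Int × Int) iv =>
          let pref := if iv.2 = cand then st.1 + 1 else st.1
          (pref, if 2 * pref > iv.1 ∧ 2 * (total - pref) > n - iv.1 then st.2 + 1 else st.2))
        (0, 0)).2

-- ===== PRECONDITION & SPEC =====
def Spec_solution (A : List Int) (out : Int) : Prop := out = solution_alt A
instance (A : List Int) (out : Int) : Decidable (Spec_solution A out) := by unfold Spec_solution; infer_instance

-- ===== CLAIM (what is proved, stated in full; the proofs are below) =====
def Claim_equal_solution : Prop := ∀ (A : List Int), Dom_solution A → Spec_solution A (solution A)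

-- ===== LEMMAS AND PROOFS =====

-- strict majority (count*2 exceeds length), used only by the proofs
def majP (m : Int) (l : List Int) : Prop := l.length < 2 * l.count m

lemma count_add_count_le (l : List Int) (x y : Int) (h : x ≠ y) :
    l.count x + l.count y ≤ l.length := by
  induction l with
  | nil => simp
  | cons a t ih =>
    simp only [List.count_cons, List.length_cons]
    by_cases hx : a = x <;> by_cases hy : a = y <;> simp_all <;> omega

lemma majP_unique {l : List Int} {x y : Int} (hx : majP x l) (hy : majP y l) : x = y := by
  by_contra hne
  have := count_add_count_le l x y hne
  unfold majP at hx hy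
  omega

lemma pairwise_le_getLast : ∀ (l : List Int), l.Pairwise (· ≤ ·) →
    ∀ (p x : Int), l.getLast? = some p → x ∈ l → x ≤ p := by
  intro l
  induction l with
  | nil => intro _ p x h; simp at h
  | cons a t ih =>
    intro hpw p x hp hx
    cases t with
    | nil =>
      simp at hp hx
      omega
    | cons b t' =>
      have hp' : (b :: t').getLast? = some p := by
        simpa [List.getLast?_cons_cons] using hp
      have hpw' : (b :: t').Pairwise (· ≤ ·) := hpw.of_cons
      rcases List.mem_cons.mp hx with rfl | hx'
      · have hpm : p ∈ b :: t' := List.mem_of_getLast? hp'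
        exact (List.pairwise_cons.mp hpw).1 p hpm
      · exact ih hpw' p x hp' hx'

-- loop invariant for find_leader's scan over the sorted list: after processing 'done'
-- (sorted, last element p, run count c, best count maxc attained by y), the remaining fold
-- ends with max_count = the multiplicity of its leader, maximal among all elements.
lemma scan_inv : ∀ (l done : List Int) (p : Int) (c maxc : Nat) (y : Int),
    (done ++ l).Pairwise (· ≤ ·) →
    done.getLast? = some p → c = done.count p →
    (∀ z : Int, done.count z ≤ maxc) → done.count y = maxc →
    ∃ p' c' y', l.foldl flStep (some p, c, maxc, some y)
        = (some p', c', (done ++ l).count y', some y')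
      ∧ ∀ z : Int, (done ++ l).count z ≤ (done ++ l).count y' := by
  intro l
  induction l with
  | nil =>
    intro done p c maxc y _ _ _ hmax hy
    refine ⟨p, c, y, ?_, ?_⟩
    · simp [List.foldl_nil, hy]
    · intro z; simp only [List.append_nil]; have := hmax z; omega
  | cons i t ih =>
    intro done p c maxc y hpw hp hc hmax hy
    have hassoc : done ++ i :: t = (done ++ [i]) ++ t := by simp
    have hpwd : done.Pairwise (· ≤ ·) :=
      (List.pairwise_append.mp hpw).1
    have hle : ∀ a ∈ done, ∀ b ∈ i :: t, a ≤ b := (List.pairwise_append.mp hpw).2.2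
    -- the value of count' in this step
    have hc1 : (done ++ [i]).count i = (if i = p then c + 1 else 1 : Nat) := by
      by_cases hip : i = p
      · subst hip
        simp [List.count_append, hc]
      · have hnotmem : i ∉ done := by
          intro him
          have h1 : i ≤ p := pairwise_le_getLast done hpwd p i hp him
          have h2 : p ≤ i := hle p (List.mem_of_getLast? hp) i (by simp)
          exact hip (le_antisymm h1 h2)
        simp [List.count_append, List.count_eq_zero.mpr hnotmem, hip]
    have hstep : flStep (some p, c, maxc, some y) i
        = (if maxc < (if i = p then c + 1 else 1 : Nat) then
            (some i, (if i = p then c + 1 else 1 : Nat), (if i = p then c + 1 else 1 : Nat), some i)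
          else (some i, (if i = p then c + 1 else 1 : Nat), maxc, some y)) := by
      simp [flStep]
    have hlast : (done ++ [i]).getLast? = some i := List.getLast?_concat
    have hpw' : ((done ++ [i]) ++ t).Pairwise (· ≤ ·) := by rw [← hassoc]; exact hpw
    set c1 : Nat := (if i = p then c + 1 else 1 : Nat) with hc1def
    rw [List.foldl_cons, hstep]
    by_cases hgt : maxc < c1
    · simp only [if_pos hgt]
      obtain ⟨p', c', y', heq, hbd⟩ := ih (done ++ [i]) i c1 c1 i hpw' hlast hc1.symm
        (by
          intro z
          by_cases hzi : z = i
          · subst hzi; omega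
          · have : (done ++ [i]).count z = done.count z := by
              simp [List.count_append, Ne.symm hzi]
            rw [this]; exact le_trans (hmax z) (le_of_lt hgt))
        hc1
      refine ⟨p', c', y', ?_, ?_⟩
      · rw [heq, hassoc]
      · rw [hassoc]; exact hbd
    · simp only [if_neg hgt]
      have hyi : y ≠ i := by
        intro h
        have h2 : (done ++ [i]).count i = done.count i + 1 := by simp [List.count_append]
        have h3 : done.count i = maxc := by rw [← h]; exact hy
        omega
      have hy' : (done ++ [i]).count y = maxc := by
        simp [List.count_append, Ne.symm hyi, hy]
      obtain ⟨p', c', y', heq, hbd⟩ := ih (done ++ [i]) i c1 maxc y hpw' hlast hc1.symm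
        (by
          intro z
          by_cases hzi : z = i
          · subst hzi; omega
          · have : (done ++ [i]).count z = done.count z := by
              simp [List.count_append, Ne.symm hzi]
            rw [this]; exact hmax z)
        hy'
      refine ⟨p', c', y', ?_, ?_⟩
      · rw [heq, hassoc]
      · rw [hassoc]; exact hbd

-- characterisation of find_leader: it returns x exactly when x is a strict majority
lemma findLeader_some_iff (B : List Int) (x : Int) :
    findLeader B = some x ↔ majP x B := by
  unfold findLeader majP
  by_cases h1 : B.length = 1
  · obtain ⟨b, rfl⟩ := List.length_eq_one_iff.mp h1
    simp only [if_pos h1]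
    constructor
    · intro h
      have hbx : b = x := by
        simpa [PySem.List.pyGet?, PySem.List.pyIdx?] using h
      subst hbx; simp
    · intro h
      have hbx : b = x := by
        by_contra hne
        simp [hne] at h
      subst hbx
      simp [PySem.List.pyGet?, PySem.List.pyIdx?]
  · simp only [if_neg h1]
    cases hs : PySem.List.sorted B (fun x => x) false with
    | nil =>
      have hB : B = [] := (PySem.List.sorted_eq_nil_iff B (fun x => x) false).mp hs
      subst hB
      simp
    | cons h t =>
      have hperm : (h :: t).Perm B := hs ▸ PySem.List.sorted_perm B (fun x => x) false
      have hpw : (h :: t).Pairwise (· ≤ ·) := by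
        have := PySem.List.sorted_pairwise B (fun x => x)
        rw [hs] at this
        exact this
      have hfirst : flStep (none, 0, 0, none) h = (some h, 1, 1, some h) := by
        simp [flStep]
      obtain ⟨p', c', y', heq, hbd⟩ := scan_inv t [h] h 1 1 h
        (by simpa using hpw) rfl (by simp) (by intro z; simp [List.count_singleton']; split <;> omega)
        (by simp)
      have hfold : (h :: t).foldl flStep (none, 0, 0, none)
          = (some p', c', (h :: t).count y', some y') := by
        rw [List.foldl_cons, hfirst]
        simpa using heq
      have hbd' : ∀ z : Int, (h :: t).count z ≤ (h :: t).count y' := by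
        intro z; simpa using hbd z
      have hcy : ∀ z : Int, (h :: t).count z = B.count z := fun z => hperm.count_eq z
      have hlen : (h :: t).length = B.length := hperm.length_eq
      rw [hfold]
      constructor
      · intro hres
        by_cases hcond : B.length < 2 * (h :: t).count y'
        · simp only [if_pos hcond] at hres
          have : y' = x := by injection hres
          subst this
          rw [hcy y'] at hcond
          exact hcond
        · simp [if_neg hcond] at hres
      · intro hx
        have hxy : B.count x ≤ B.count y' := by
          rw [← hcy x, ← hcy y']; exact hbd' x
        have hcond : B.length < 2 * (h :: t).count y' := by
          rw [hcy y']; omega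
        simp only [if_pos hcond]
        have hmy : majP y' B := by unfold majP; rw [← hcy y']; exact hcond
        have hmx : majP x B := hx
        rw [majP_unique hmy hmx]

-- the median of the sorted list is the (unique) strict-majority element, when one exists
lemma median_eq_of_maj (A : List Int) (m : Int) (hm : majP m A) :
    (PySem.List.sorted A (fun x => x) false).getD (A.length / 2) 0 = m := by
  set s := PySem.List.sorted A (fun x => x) false with hsdef
  have hperm : s.Perm A := PySem.List.sorted_perm A (fun x => x) false
  have hlen : s.length = A.length := hperm.length_eq
  have hcnt : s.count m = A.count m := hperm.count_eq m
  have hmA : A.length < 2 * A.count m := hm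
  have hcle : A.count m ≤ A.length := by
    rw [← hcnt, ← hlen]; exact List.count_le_length
  have hn1 : 1 ≤ A.length := by omega
  set k := A.length / 2 with hkdef
  have hk : k < s.length := by rw [hlen]; omega
  rw [List.getD_eq_getElem s 0 hk]
  rcases lt_trichotomy s[k] m with hlt | heq | hgt
  · exfalso
    -- all of s.take (k+1) is < m, so count m s ≤ length - (k+1)
    have hnot : m ∉ s.take (k + 1) := by
      intro hmem
      obtain ⟨j, hj, hje⟩ := List.mem_iff_getElem.mp hmem
      have hj' : j < s.length := by
        have := List.length_take_le (k+1) s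
        omega
      have hjk : j ≤ k := by
        rw [List.length_take] at hj
        omega
      have : s[j] ≤ s[k] := PySem.List.sorted_id_getElem_mono A hjk hk
      rw [List.getElem_take] at hje
      omega
    have hsplit : s.count m = (s.take (k+1)).count m + (s.drop (k+1)).count m := by
      conv_lhs => rw [← List.take_append_drop (k+1) s]
      rw [List.count_append]
    have h0 : (s.take (k+1)).count m = 0 := List.count_eq_zero.mpr hnot
    have hdl : (s.drop (k+1)).count m ≤ s.length - (k+1) := by
      calc (s.drop (k+1)).count m ≤ (s.drop (k+1)).length := List.count_le_length
        _ = s.length - (k+1) := List.length_drop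
    omega
  · exact heq
  · exfalso
    -- all of s.drop k is > m, so count m s ≤ k
    have hnot : m ∉ s.drop k := by
      intro hmem
      obtain ⟨j, hj, hje⟩ := List.mem_iff_getElem.mp hmem
      have hkj : k + j < s.length := by
        rw [List.length_drop] at hj
        omega
      have : s[k] ≤ s[k + j] := PySem.List.sorted_id_getElem_mono A (by omega) hkj
      rw [List.getElem_drop] at hje
      omega
    have hsplit : s.count m = (s.take k).count m + (s.drop k).count m := by
      conv_lhs => rw [← List.take_append_drop k s]
      rw [List.count_append]
    have h0 : (s.drop k).count m = 0 := List.count_eq_zero.mpr hnot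
    have htl : (s.take k).count m ≤ k := by
      calc (s.take k).count m ≤ (s.take k).length := List.count_le_length
        _ ≤ k := by rw [List.length_take]; omega
    omega

-- per-split 0/1 indicator of A's loop body
def aInd (A : List Int) (i : Nat) : Int :=
  match findLeader (A.take i) with
  | none => 0
  | some l =>
    match findLeader (A.drop i) with
    | none => 0
    | some r => if l = r then 1 else 0

lemma afold (A : List Int) : ∀ (l : List Nat) (res : Int),
    l.foldl
      (fun res c =>
        match findLeader (A.take (c + 1)) with
        | none => res
        | some l =>
          match findLeader (A.drop (c + 1)) with
          | none => res
          | some r => if l = r then res + 1 else res)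
      res
    = res + (l.map (fun c => aInd A (c + 1))).sum := by
  intro l
  induction l with
  | nil => intro res; simp
  | cons c t ih =>
    intro res
    rw [List.foldl_cons, ih]
    simp only [List.map_cons, List.sum_cons]
    unfold aInd
    rcases h1 : findLeader (A.take (c + 1)) with _ | lv
    · ring
    · rcases h2 : findLeader (A.drop (c + 1)) with _ | rv
      · ring
      · by_cases he : lv = rv <;> simp [he] <;> try ring

lemma solution_eq_sum (A : List Int) :
    solution A = ((List.range A.length).map (fun c => aInd A (c + 1))).sum := by
  unfold solution
  rw [afold]
  ring

-- per-split 0/1 indicator of B's loop body (i the 1-based split position)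
def bInd (A : List Int) (m : Int) (i : Nat) : Int :=
  if (i : Int) < 2 * ((A.take i).count m : Int)
      ∧ (A.length : Int) - (i : Int) < 2 * ((A.drop i).count m : Int) then 1 else 0

lemma bfold (A : List Int) (m total n : Int)
    (htot : total = A.count m) (hn : n = A.length) :
    ∀ (v u : List Int) (res : Int), A = u ++ v →
    ((PySem.List.enumerate v ((u.length : Int) + 1)).foldl
      (fun (st : Int × Int) iv =>
        let pref := if iv.2 = m then st.1 + 1 else st.1
        (pref, if 2 * pref > iv.1 ∧ 2 * (total - pref) > n - iv.1 then st.2 + 1 else st.2))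
      ((u.count m : Int), res))
    = ((A.count m : Int),
        res + ((List.range v.length).map (fun j => bInd A m (u.length + j + 1))).sum) := by
  intro v
  induction v with
  | nil =>
    intro u res hA
    simp [PySem.List.enumerate, hA]
  | cons x w ih =>
    intro u res hA
    have hA' : A = (u ++ [x]) ++ w := by simpa using hA
    rw [PySem.List.enumerate_cons, List.foldl_cons]
    have hpref : (if x = m then ((u.count m : Int)) + 1 else ((u.count m : Int)))
        = (((u ++ [x]).count m : Int)) := by
      by_cases hx : x = m <;> simp [List.count_append, hx]
    have htake : A.take (u.length + 1) = u ++ [x] := by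
      rw [hA']
      have : u.length + 1 = (u ++ [x]).length := by simp
      rw [this]
      exact List.take_left
    have hdrop : A.drop (u.length + 1) = w := by
      rw [hA']
      have : u.length + 1 = (u ++ [x]).length := by simp
      rw [this]
      exact List.drop_left
    have hcw : A.count m = (u ++ [x]).count m + w.count m := by
      rw [hA', List.count_append]
    have hcond : (2 * (((u ++ [x]).count m : Int)) > (u.length : Int) + 1
          ∧ 2 * (total - (((u ++ [x]).count m : Int))) > n - ((u.length : Int) + 1))
        ↔ (((u.length + 1 : Nat) : Int) < 2 * ((A.take (u.length + 1)).count m : Int)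
          ∧ (A.length : Int) - ((u.length + 1 : Nat) : Int)
              < 2 * ((A.drop (u.length + 1)).count m : Int)) := by
      rw [htake, hdrop, htot, hn]
      constructor
      · intro ⟨ha, hb⟩
        constructor
        · push_cast; omega
        · push_cast at hb ⊢; omega
      · intro ⟨ha, hb⟩
        constructor
        · push_cast at ha ⊢; omega
        · push_cast at hb ⊢; omega
    have hstep :
        ((fun (st : Int × Int) iv =>
          let pref := if iv.2 = m then st.1 + 1 else st.1
          (pref, if 2 * pref > iv.1 ∧ 2 * (total - pref) > n - iv.1 then st.2 + 1 else st.2))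
          ((u.count m : Int), res) (((u.length : Int) + 1), x))
        = (((u ++ [x]).count m : Int), res + bInd A m (u.length + 1)) := by
      simp only []
      rw [hpref]
      unfold bInd
      by_cases hcc : ((u.length + 1 : Nat) : Int) < 2 * ((A.take (u.length + 1)).count m : Int)
          ∧ (A.length : Int) - ((u.length + 1 : Nat) : Int)
              < 2 * ((A.drop (u.length + 1)).count m : Int)
      · rw [if_pos (hcond.mpr hcc), if_pos hcc]
      · rw [if_neg (fun h => hcc (hcond.mp h)), if_neg hcc]
        simp
    refine Eq.trans (congrArg (fun st : Int × Int => List.foldl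
      (fun (st : Int × Int) iv =>
        let pref := if iv.2 = m then st.1 + 1 else st.1
        (pref, if 2 * pref > iv.1 ∧ 2 * (total - pref) > n - iv.1 then st.2 + 1 else st.2))
      st (PySem.List.enumerate w ((u.length : Int) + 1 + 1))) hstep) ?_
    have hoff : (u.length : Int) + 1 + 1 = (((u ++ [x]).length : Nat) : Int) + 1 := by
      simp only [List.length_append, List.length_singleton]
      push_cast
      ring
    beta_reduce
    rw [hoff, ih (u ++ [x]) (res + bInd A m (u.length + 1)) hA']
    congr 1
    rw [List.length_cons, List.range_succ_eq_map, List.map_cons, List.sum_cons, List.map_map]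
    have hfun : (List.map ((fun j => bInd A m (u.length + j + 1)) ∘ Nat.succ) (List.range w.length))
        = List.map (fun j => bInd A m ((u ++ [x]).length + j + 1)) (List.range w.length) := by
      apply List.map_congr_left
      intro j _
      simp only [Function.comp_apply]
      congr 1
      simp
      omega
    rw [hfun]
    have h01 : u.length + 0 + 1 = u.length + 1 := by omega
    rw [h01]
    ring

-- pointwise: with a global majority m present, A's split test equals B's
lemma aInd_eq_bInd (A : List Int) (m : Int) (hm : majP m A)
    (c : Nat) (hc : c < A.length) :
    aInd A (c + 1) = bInd A m (c + 1) := by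
  set i := c + 1 with hidef
  have hin : i ≤ A.length := by omega
  have hlt : (A.take i).length = i := by rw [List.length_take]; omega
  have hld : (A.drop i).length = A.length - i := List.length_drop
  have hsplit : ∀ z : Int, A.count z = (A.take i).count z + (A.drop i).count z := by
    intro z
    conv_lhs => rw [← List.take_append_drop i A]
    rw [List.count_append]
  have hcast : ((A.length - i : Nat) : Int) = (A.length : Int) - (i : Int) := by
    push_cast [hin]; omega
  unfold aInd bInd
  by_cases hcond : (i : Int) < 2 * ((A.take i).count m : Int)
      ∧ (A.length : Int) - (i : Int) < 2 * ((A.drop i).count m : Int)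
  · obtain ⟨h1, h2⟩ := hcond
    have hmt : majP m (A.take i) := by
      unfold majP; rw [hlt]; exact_mod_cast h1
    have hmd : majP m (A.drop i) := by
      unfold majP; rw [hld]
      rw [← hcast] at h2
      exact_mod_cast h2
    rw [(findLeader_some_iff _ m).mpr hmt, (findLeader_some_iff _ m).mpr hmd]
    simp [h1, h2]
  · rw [if_neg hcond]
    rcases hf1 : findLeader (A.take i) with _ | l
    · rfl
    · rcases hf2 : findLeader (A.drop i) with _ | r
      · rfl
      · by_cases hlr : l = r
        · exfalso
          subst hlr
          have hml : majP l (A.take i) := (findLeader_some_iff _ _).mp hf1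
          have hmr : majP l (A.drop i) := (findLeader_some_iff _ _).mp hf2
          have hmlA : majP l A := by
            unfold majP at hml hmr ⊢
            rw [hlt] at hml
            rw [hld] at hmr
            have := hsplit l
            omega
          have hlm : l = m := majP_unique hmlA hm
          subst hlm
          apply hcond
          unfold majP at hml hmr
          rw [hlt] at hml
          rw [hld] at hmr
          constructor
          · exact_mod_cast hml
          · rw [← hcast]; exact_mod_cast hmr
        · simp [hlr]

-- with no global majority, every split test of A fails
lemma aInd_eq_zero (A : List Int) (hnm : ∀ x : Int, ¬ majP x A)
    (c : Nat) (hc : c < A.length) :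
    aInd A (c + 1) = 0 := by
  set i := c + 1 with hidef
  have hin : i ≤ A.length := by omega
  have hlt : (A.take i).length = i := by rw [List.length_take]; omega
  have hld : (A.drop i).length = A.length - i := List.length_drop
  unfold aInd
  rcases hf1 : findLeader (A.take i) with _ | l
  · rfl
  · rcases hf2 : findLeader (A.drop i) with _ | r
    · rfl
    · by_cases hlr : l = r
      · exfalso
        subst hlr
        have hml : majP l (A.take i) := (findLeader_some_iff _ _).mp hf1
        have hmr : majP l (A.drop i) := (findLeader_some_iff _ _).mp hf2
        refine hnm l ?_
        unfold majP at hml hmr ⊢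
        rw [hlt] at hml
        rw [hld] at hmr
        have hsplit : A.count l = (A.take i).count l + (A.drop i).count l := by
          conv_lhs => rw [← List.take_append_drop i A]
          rw [List.count_append]
        omega
      · simp [hlr]

lemma solution_eq_alt (A : List Int) : solution A = solution_alt A := by
  rw [solution_eq_sum]
  unfold solution_alt
  by_cases hA : A = []
  · subst hA; simp
  · have hlen0 : A.length ≠ 0 := by
      intro h; exact hA (List.eq_nil_of_length_eq_zero h)
    have hn : ((A.length : Int)) ≠ 0 := by exact_mod_cast hlen0
    simp only [if_neg hn]
    by_cases hmaj : ∃ x : Int, majP x A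
    · obtain ⟨m, hm⟩ := hmaj
      have hm' : A.length < 2 * A.count m := hm
      have hcand : PySem.List.pyGetD (PySem.List.sorted A (fun x => x) false)
          (PySem.Int.floordiv (A.length : Int) 2) 0 = m := by
        have hdv : PySem.Int.floordiv (A.length : Int) 2 = ((A.length / 2 : Nat) : Int) := by
          exact_mod_cast PySem.Int.floordiv_natCast A.length 2
        rw [hdv, PySem.List.pyGetD_natCast]
        exact median_eq_of_maj A m hm
      rw [hcand]
      have hno : ¬ (2 * ((A.count m : Nat) : Int) ≤ (A.length : Int)) := by
        omega
      rw [if_neg hno]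
      have hb := bfold A m ((A.count m : Nat) : Int) ((A.length : Nat) : Int) rfl rfl A [] 0 (by simp)
      simp only [List.length_nil, List.count_nil, CharP.cast_eq_zero,
        zero_add] at hb
      rw [hb]
      congr 1
      apply List.map_congr_left
      intro c hcm
      have hc : c < A.length := List.mem_range.mp hcm
      rw [aInd_eq_bInd A m hm c hc]
    · rw [not_exists] at hmaj
      set cand := PySem.List.pyGetD (PySem.List.sorted A (fun x => x) false)
          (PySem.Int.floordiv (A.length : Int) 2) 0 with hcdef
      have hif : 2 * ((A.count cand : Nat) : Int) ≤ (A.length : Int) := by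
        have := hmaj cand
        unfold majP at this
        omega
      rw [if_pos hif]
      have hz : ∀ c ∈ List.range A.length, aInd A (c + 1) = (fun _ => (0 : Int)) c := by
        intro c hcm
        exact aInd_eq_zero A hmaj c (List.mem_range.mp hcm)
      rw [List.map_congr_left hz]
      simp

-- ===== VERDICT (by name: the statement is the Claim_ definition above) =====
theorem solution_spec : Claim_equal_solution := by
  intro A _
  unfold Spec_solution
  exact solution_eq_alt A
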